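-- pv_equiv track=rewrite | github.com/matuspintek-boop/ib111 | 11/p2_rewrite.py | conversion_possible
-- ===== SOURCE A (Python) =====
-- def conversion_possible(wanted: str, rules: dict[str, list[str]],
--                         already_had: set[str]) -> bool:
--
--     initial: int = 0
--     while len(already_had) > initial and wanted not in already_had:
--         initial = len(already_had)
--         to_add = set()
--         for char in already_had:
--             for new_char in rules.get(char, []):
--                 to_add.add(new_char)
--         already_had.update(to_add)
--     return wanted in already_had
-- ===== SOURCE B (Python) =====
-- def conversion_possible(wanted: str, rules: dict[str, list[str]],
--                         already_had: set[str]) -> bool: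
--     # BFS worklist: each symbol is expanded exactly once; early exit on wanted.
--     # (Does not mutate already_had, unlike A; the equivalence is about the return value.)
--     if wanted in already_had:
--         return True
--     seen = set(already_had)
--     queue = list(already_had)
--     i = 0
--     while i < len(queue):
--         c = queue[i]
--         i += 1
--         for n in rules.get(c, []):
--             if n == wanted:
--                 return True
--             if n not in seen:
--                 seen.add(n)
--                 queue.append(n)
--     return False
-- ===== Notes on version B (the rewrite author's own statement) =====
-- stated objective: alternative
-- what changed: Replaces A's repeated full passes over the whole growing set (re-deriving every rule application each round until a fixpoint) with a worklist that expands each symbol exactly once and returns as soon as the wanted symbol is derived; B also does not mutate the caller's set.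
import Mathlib
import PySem

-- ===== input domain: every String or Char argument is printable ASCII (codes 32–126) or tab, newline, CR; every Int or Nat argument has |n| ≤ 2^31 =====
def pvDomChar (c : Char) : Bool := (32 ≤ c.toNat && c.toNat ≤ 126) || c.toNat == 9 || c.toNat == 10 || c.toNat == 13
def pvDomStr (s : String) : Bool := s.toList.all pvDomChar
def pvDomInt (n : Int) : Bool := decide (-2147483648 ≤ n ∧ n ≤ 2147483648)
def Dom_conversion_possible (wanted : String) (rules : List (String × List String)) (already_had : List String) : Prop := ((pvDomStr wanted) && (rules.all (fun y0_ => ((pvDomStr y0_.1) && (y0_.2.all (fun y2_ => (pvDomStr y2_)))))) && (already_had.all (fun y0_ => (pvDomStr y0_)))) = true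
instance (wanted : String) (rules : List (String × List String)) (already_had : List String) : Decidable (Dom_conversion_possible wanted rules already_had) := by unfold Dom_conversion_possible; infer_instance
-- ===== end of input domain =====

-- B replaces A's repeated whole-set passes with a BFS worklist expanding each symbol once,
-- early-exiting when `wanted` is derived (A also mutates already_had in Python; only the
-- return value is compared here).
def pvUniv (rules : List (String × List String)) (init : List String) : PySem.Set String :=
  PySem.Set.ofList (init ++ rules.flatMap (fun p => p.2))

-- ===== PORT A =====
-- inner double loop: to_add = set(); for char in already_had: for new_char in rules.get(char, []): to_add.add(new_char)
def pvA_toAdd (rules : List (String × List String)) (had : List String) : PySem.Set String :=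
  had.foldl (fun acc c => PySem.Set.update acc ((PySem.Dict.mk rules).getD c [])) PySem.Set.empty

-- the while loop; fuel only makes the loop total (|universe|+1 passes always reach the exit condition)
def pvA_loop (wanted : String) (rules : List (String × List String)) :
    Nat → Nat → PySem.Set String → PySem.Set String
  | 0, _, had => had
  | f+1, initial, had =>
    if initial < had.length && !(had.contains wanted) then
      pvA_loop wanted rules f had.length (PySem.Set.update had (pvA_toAdd rules had))
    else had

-- A mutates already_had in place in Python; only the return value is claimed here.
def conversion_possible (wanted : String) (rules : List (String × List String)) (already_had : List String) : Bool :=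
  (pvA_loop wanted rules ((pvUniv rules already_had).length + 1) 0
      (PySem.Set.ofList already_had)).contains wanted


-- ===== PORT B =====
-- the inner "for n in rules.get(c, [])" loop; none = early "return True"
def pvB_expand (wanted : String) :
    List String → PySem.Set String → List String → Option (PySem.Set String × List String)
  | [], seen, queue => some (seen, queue)
  | n :: ns, seen, queue =>
    if n == wanted then none
    else if seen.contains n then pvB_expand wanted ns seen queue
    else pvB_expand wanted ns (PySem.Set.add seen n) (queue ++ [n])

-- the while-loop over the pending items queue[i:] (advancing i consumes the head);
-- fuel only makes it total (each iteration shrinks 2*|U \ seen| + |pending|)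
def pvB_loop (wanted : String) (rules : List (String × List String)) :
    Nat → PySem.Set String → List String → Bool
  | 0, _, _ => false
  | _+1, _, [] => false
  | f+1, seen, c :: rest =>
    match pvB_expand wanted ((PySem.Dict.mk rules).getD c []) seen rest with
    | none => true
    | some (seen', queue') => pvB_loop wanted rules f seen' queue'

def conversion_possible_alt (wanted : String) (rules : List (String × List String)) (already_had : List String) : Bool :=
  if (PySem.Set.ofList already_had).contains wanted then true
  else pvB_loop wanted rules (2 * (pvUniv rules already_had).length + already_had.length + 1)
      (PySem.Set.ofList already_had) (PySem.Set.ofList already_had)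


-- ===== PRECONDITION & SPEC =====
def Spec_conversion_possible (wanted : String) (rules : List (String × List String)) (already_had : List String) (out : Bool) : Prop := out = conversion_possible_alt wanted rules already_had
instance (wanted : String) (rules : List (String × List String)) (already_had : List String) (out : Bool) : Decidable (Spec_conversion_possible wanted rules already_had out) := by unfold Spec_conversion_possible; infer_instance

-- ===== CLAIM (what is proved, stated in full; the proofs are below) =====
def Claim_equal_conversion_possible : Prop := ∀ (wanted : String) (rules : List (String × List String)) (already_had : List String), Dom_conversion_possible wanted rules already_had → Spec_conversion_possible wanted rules already_had (conversion_possible wanted rules already_had)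

-- ===== LEMMAS AND PROOFS =====

-- reachability: the closure of init under the rules (first-match lookup, as both ports use)
def pvRhs (rules : List (String × List String)) (c : String) : List String :=
  (PySem.Dict.mk rules).getD c []

inductive pvReach (rules : List (String × List String)) (init : List String) : String → Prop
  | base {x : String} : x ∈ init → pvReach rules init x
  | step {c x : String} : pvReach rules init c → x ∈ pvRhs rules c → pvReach rules init x

def pvClosed (rules : List (String × List String)) (S : List String) : Prop :=
  ∀ c ∈ S, ∀ n ∈ pvRhs rules c, n ∈ S

lemma pvReach_mem {rules : List (String × List String)} {init S : List String}
    (hC : pvClosed rules S) (hI : ∀ x ∈ init, x ∈ S) :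
    ∀ x, pvReach rules init x → x ∈ S := by
  intro x hx
  induction hx with
  | base h => exact hI _ h
  | step hc hn ih => exact hC _ ih _ hn

lemma pv_rhs_mem {rules : List (String × List String)} {c x : String}
    (h : x ∈ pvRhs rules c) : ∃ p ∈ rules, x ∈ p.2 := by
  cases hf : List.find? (fun p => p.1 == c) rules with
  | none => simp [pvRhs, PySem.Dict.getD, PySem.Dict.get?, hf] at h
  | some p =>
    simp only [pvRhs, PySem.Dict.getD, PySem.Dict.get?, hf, Option.map_some, Option.getD_some] at h
    exact ⟨p, List.mem_of_find?_eq_some hf, h⟩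

lemma pv_rhs_subset_univ {rules : List (String × List String)} {init : List String} {c x : String}
    (h : x ∈ pvRhs rules c) : x ∈ pvUniv rules init := by
  obtain ⟨p, hp, hx⟩ := pv_rhs_mem h
  simp only [pvUniv, PySem.Set.mem_ofList, List.mem_append, List.mem_flatMap]
  exact Or.inr ⟨p, hp, hx⟩

lemma pv_nodup_len {l l' : List String} (h : l.Nodup) (hs : ∀ x ∈ l, x ∈ l') :
    l.length ≤ l'.length := by
  calc l.length = l.toFinset.card := (List.toFinset_card_of_nodup h).symm
  _ ≤ l'.toFinset.card := Finset.card_le_card (fun x hx => List.mem_toFinset.2 (hs _ (List.mem_toFinset.1 hx)))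
  _ ≤ l'.length := l'.toFinset_card_le

lemma pv_mem_toAdd {rules : List (String × List String)} {had : List String} {x : String} :
    x ∈ pvA_toAdd rules had ↔ ∃ c ∈ had, x ∈ pvRhs rules c := by
  have aux : ∀ (l : List String) (acc : PySem.Set String),
      x ∈ l.foldl (fun acc c => PySem.Set.update acc ((PySem.Dict.mk rules).getD c [])) acc ↔
        x ∈ acc ∨ ∃ c ∈ l, x ∈ pvRhs rules c := by
    intro l
    induction l with
    | nil => simp
    | cons c cs ih =>
      intro acc
      simp only [List.foldl_cons, ih, PySem.Set.mem_update, List.mem_cons]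
      constructor
      · rintro (h | h)
        · rcases h with h | h
          · exact Or.inl h
          · exact Or.inr ⟨c, Or.inl rfl, h⟩
        · rcases h with ⟨d, hd, hx⟩
          exact Or.inr ⟨d, Or.inr hd, hx⟩
      · rintro (h | ⟨d, (rfl | hd), hx⟩)
        · exact Or.inl (Or.inl h)
        · exact Or.inl (Or.inr hx)
        · exact Or.inr ⟨d, hd, hx⟩
  rw [pvA_toAdd, aux]
  simp [PySem.Set.empty]

lemma pv_update_len (s : PySem.Set String) (xs : List String) :
    s.length ≤ (PySem.Set.update s xs).length ∧
      ((PySem.Set.update s xs).length = s.length → PySem.Set.update s xs = s) := by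
  induction xs generalizing s with
  | nil => simp [PySem.Set.update]
  | cons y ys ih =>
    have hadd : s.length ≤ (s.add y).length ∧ ((s.add y).length = s.length → s.add y = s) := by
      by_cases hc : s.contains y = true
      · have hy := (PySem.Set.contains_iff s y).1 hc
        simp [PySem.Set.add, hy]
      · have hy : y ∉ s := fun h => hc ((PySem.Set.contains_iff s y).2 h)
        simp [PySem.Set.add, hy]
    have hrec := ih (s.add y)
    have hstep : PySem.Set.update s (y :: ys) = PySem.Set.update (s.add y) ys := by
      simp [PySem.Set.update]
    rw [hstep]
    constructor
    · omega
    · intro hlen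
      have h1 : (s.add y).length = s.length := by omega
      rw [hadd.2 h1] at hrec hlen ⊢
      exact hrec.2 hlen

lemma pvA_loop_sound (wanted : String) (rules : List (String × List String)) (init : List String) :
    ∀ (f i : Nat) (had : PySem.Set String), (∀ x ∈ had, pvReach rules init x) →
      ∀ x ∈ pvA_loop wanted rules f i had, pvReach rules init x := by
  intro f
  induction f with
  | zero => intro i had hR x hx; exact hR x (by simpa [pvA_loop] using hx)
  | succ f ih =>
    intro i had hR x hx
    rw [pvA_loop] at hx
    split at hx
    · refine ih _ _ ?_ x hx
      intro y hy
      rcases (PySem.Set.mem_update _ _ _).1 hy with h | h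
      · exact hR y h
      · rcases pv_mem_toAdd.1 h with ⟨c, hc, hyc⟩
        exact pvReach.step (hR c hc) hyc
    · exact hR x hx

lemma pvA_loop_complete (wanted : String) (rules : List (String × List String)) (init : List String) :
    ∀ (f i : Nat) (had : PySem.Set String), had.Nodup →
      (∀ x ∈ had, x ∈ pvUniv rules init) →
      ((pvUniv rules init).length + 1 ≤ f + i) →
      (had.length ≤ i → pvClosed rules had) →
      (∀ x ∈ init, x ∈ had) →
      pvReach rules init wanted → wanted ∈ pvA_loop wanted rules f i had := by
  intro f
  induction f with
  | zero =>
    intro i had hnd hsub hfuel hcl hinit hreach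
    have hlen : had.length ≤ (pvUniv rules init).length := pv_nodup_len hnd hsub
    rw [pvA_loop]
    exact pvReach_mem (hcl (by omega)) hinit _ hreach
  | succ f ih =>
    intro i had hnd hsub hfuel hcl hinit hreach
    rw [pvA_loop]
    by_cases hcond : (i < had.length && !had.contains wanted) = true
    · rw [if_pos hcond]
      have hi : i < had.length := by
        simp only [Bool.and_eq_true, decide_eq_true_eq] at hcond
        exact hcond.1
      refine ih had.length _ (PySem.Set.nodup_update _ _ hnd) ?_ (by omega) ?_ ?_ hreach
      · intro x hx
        rcases (PySem.Set.mem_update _ _ _).1 hx with h | h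
        · exact hsub x h
        · rcases pv_mem_toAdd.1 h with ⟨c, _, hxc⟩
          exact pv_rhs_subset_univ hxc
      · intro hlen c hc n hn
        have hupd := pv_update_len had (pvA_toAdd rules had)
        have heq : PySem.Set.update had (pvA_toAdd rules had) = had := hupd.2 (by omega)
        have hc' : c ∈ had := heq ▸ hc
        exact (PySem.Set.mem_update _ _ _).2 (Or.inr (pv_mem_toAdd.2 ⟨c, hc', hn⟩))
      · intro x hx
        exact (PySem.Set.mem_update _ _ _).2 (Or.inl (hinit x hx))
    · rw [if_neg hcond]
      by_cases hw : had.contains wanted = true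
      · exact (PySem.Set.contains_iff _ _).1 hw
      · have hle : had.length ≤ i := by
          by_contra hlt
          refine hcond (by simp only [Nat.lt_of_not_le hlt, decide_true, Bool.true_and, Bool.not_eq_eq_eq_not]; exact Bool.not_eq_true _ ▸ hw)
        exact pvReach_mem (hcl hle) hinit _ hreach

lemma pvA_iff (wanted : String) (rules : List (String × List String)) (already_had : List String) :
    conversion_possible wanted rules already_had = true ↔ pvReach rules already_had wanted := by
  rw [conversion_possible]
  rw [PySem.Set.contains_iff]
  constructor
  · intro h
    refine pvA_loop_sound wanted rules already_had _ _ _ ?_ _ h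
    intro x hx
    exact pvReach.base ((PySem.Set.mem_ofList _ _).1 hx)
  · intro h
    refine pvA_loop_complete wanted rules already_had _ _ _ (PySem.Set.nodup_ofList _) ?_ (by omega) ?_ ?_ h
    · intro x hx
      simp only [pvUniv, PySem.Set.mem_ofList, List.mem_append]
      exact Or.inl ((PySem.Set.mem_ofList _ _).1 hx)
    · intro hlen
      have : PySem.Set.ofList already_had = [] := List.length_eq_zero_iff.1 (Nat.le_zero.1 hlen)
      intro c hc
      rw [this] at hc
      simp at hc
    · intro x hx
      exact (PySem.Set.mem_ofList _ _).2 hx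

lemma pvB_expand_none (wanted : String) :
    ∀ (ns : List String) (seen : PySem.Set String) (queue : List String),
      pvB_expand wanted ns seen queue = none ↔ wanted ∈ ns := by
  intro ns
  induction ns with
  | nil => intro seen queue; simp [pvB_expand]
  | cons n ns ih =>
    intro seen queue
    rw [pvB_expand]
    by_cases hn : (n == wanted) = true
    · simp [List.mem_cons, (beq_iff_eq).1 hn]
    · have hne : n ≠ wanted := fun h => hn (beq_iff_eq.2 h)
      by_cases hc : seen.contains n = true
      · have hm : n ∈ seen := (PySem.Set.contains_iff _ _).1 hc
        simp [hn, hm, ih, List.mem_cons, Ne.symm hne]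
      · have hm : n ∉ seen := fun hmm => hc ((PySem.Set.contains_iff _ _).2 hmm)
        simp [hn, hm, ih, List.mem_cons, Ne.symm hne]

lemma pvB_expand_some (wanted : String) :
    ∀ (ns : List String) (seen : PySem.Set String) (queue : List String)
      (seen' : PySem.Set String) (queue' : List String),
      pvB_expand wanted ns seen queue = some (seen', queue') →
      (∀ x ∈ seen, x ∈ seen') ∧ (∀ x ∈ seen', x ∈ seen ∨ x ∈ ns) ∧
      (∀ n ∈ ns, n ∈ seen') ∧ (∀ x ∈ queue', x ∈ queue ∨ x ∈ ns) ∧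
      (∀ x ∈ queue, x ∈ queue') ∧
      (∀ x ∈ seen', x ∈ seen ∨ x ∈ queue') ∧
      (seen'.length + queue.length = seen.length + queue'.length) ∧
      (seen.Nodup → seen'.Nodup) := by
  intro ns
  induction ns with
  | nil =>
    intro seen queue seen' queue' h
    rw [pvB_expand] at h
    injection h with h
    injection h with h1 h2
    subst h1; subst h2
    exact ⟨fun x hx => hx, fun x hx => Or.inl hx, by simp, fun x hx => Or.inl hx,
      fun x hx => hx, fun x hx => Or.inl hx, rfl, id⟩
  | cons n ns ih =>
    intro seen queue seen' queue' h
    rw [pvB_expand] at h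
    by_cases hn : (n == wanted) = true
    · rw [if_pos hn] at h; exact absurd h (by simp)
    · rw [if_neg hn] at h
      by_cases hc : seen.contains n = true
      · rw [if_pos hc] at h
        have hmem : n ∈ seen := (PySem.Set.contains_iff _ _).1 hc
        obtain ⟨h1, h2, h3, h4, h5, h8, h6, h7⟩ := ih _ _ _ _ h
        refine ⟨h1, ?_, ?_, ?_, h5, ?_, h6, h7⟩
        · intro x hx
          rcases h2 x hx with hx | hx
          · exact Or.inl hx
          · exact Or.inr (List.mem_cons_of_mem _ hx)
        · intro m hm
          rcases List.mem_cons.1 hm with rfl | hm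
          · exact h1 _ hmem
          · exact h3 _ hm
        · intro x hx
          rcases h4 x hx with hx | hx
          · exact Or.inl hx
          · exact Or.inr (List.mem_cons_of_mem _ hx)
        · exact h8
      · rw [if_neg hc] at h
        have hnmem : n ∉ seen := fun hm => hc ((PySem.Set.contains_iff _ _).2 hm)
        have haddeq : PySem.Set.add seen n = seen ++ [n] := by simp [PySem.Set.add, hnmem]
        obtain ⟨h1, h2, h3, h4, h5, h8, h6, h7⟩ := ih _ _ _ _ h
        have hmem_add : ∀ x, x ∈ PySem.Set.add seen n ↔ x ∈ seen ∨ x = n :=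
          fun x => PySem.Set.mem_add seen n x
        have hqn : n ∈ queue' := h5 n (by simp)
        refine ⟨?_, ?_, ?_, ?_, ?_, ?_, ?_, ?_⟩
        · intro x hx; exact h1 x ((hmem_add x).2 (Or.inl hx))
        · intro x hx
          rcases h2 x hx with hx | hx
          · rcases (hmem_add x).1 hx with hx | rfl
            · exact Or.inl hx
            · exact Or.inr (by simp)
          · exact Or.inr (List.mem_cons_of_mem _ hx)
        · intro m hm
          rcases List.mem_cons.1 hm with rfl | hm
          · exact h1 _ ((hmem_add m).2 (Or.inr rfl))
          · exact h3 _ hm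
        · intro x hx
          rcases h4 x hx with hx | hx
          · rcases List.mem_append.1 hx with hx | hx
            · exact Or.inl hx
            · exact Or.inr (List.mem_cons.2 (Or.inl (List.mem_singleton.1 hx)))
          · exact Or.inr (List.mem_cons_of_mem _ hx)
        · intro x hx; exact h5 x (List.mem_append_left _ hx)
        · intro x hx
          rcases h8 x hx with hx | hx
          · rcases (hmem_add x).1 hx with hx | rfl
            · exact Or.inl hx
            · exact Or.inr hqn
          · exact Or.inr hx
        · have hlen : (PySem.Set.add seen n).length = seen.length + 1 := by
            rw [haddeq]; simp
          have hqlen : (queue ++ [n]).length = queue.length + 1 := by simp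
          omega
        · intro hnd
          exact h7 (PySem.Set.nodup_add _ _ hnd)

lemma pvB_loop_sound (wanted : String) (rules : List (String × List String)) (init : List String) :
    ∀ (f : Nat) (seen : PySem.Set String) (queue : List String),
      (∀ x ∈ seen, pvReach rules init x) → (∀ x ∈ queue, x ∈ seen) →
      pvB_loop wanted rules f seen queue = true → pvReach rules init wanted := by
  intro f
  induction f with
  | zero => intro seen queue _ _ h; simp [pvB_loop] at h
  | succ f ih =>
    intro seen queue hR hq h
    cases queue with
    | nil => simp [pvB_loop] at h
    | cons c rest =>
      rw [pvB_loop] at h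
      have hcR : pvReach rules init c := hR c (hq c (List.mem_cons_self))
      cases hexp : pvB_expand wanted ((PySem.Dict.mk rules).getD c []) seen rest with
      | none =>
        have hw : wanted ∈ pvRhs rules c := (pvB_expand_none wanted _ _ _).1 hexp
        exact pvReach.step hcR hw
      | some p =>
        obtain ⟨seen', queue'⟩ := p
        rw [hexp] at h
        obtain ⟨h1, h2, h3, h4, h5, h8, h6, h7⟩ := pvB_expand_some wanted _ _ _ _ _ hexp
        refine ih seen' queue' ?_ ?_ h
        · intro x hx
          rcases h2 x hx with hx | hx
          · exact hR x hx
          · exact pvReach.step hcR hx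
        · intro x hx
          rcases h4 x hx with hx | hx
          · exact h1 x (hq x (List.mem_cons_of_mem _ hx))
          · exact h3 x hx

lemma pvB_loop_complete (wanted : String) (rules : List (String × List String)) (init : List String) :
    ∀ (f : Nat) (seen : PySem.Set String) (queue : List String),
      seen.Nodup → (∀ x ∈ seen, x ∈ pvUniv rules init) →
      (∀ x ∈ queue, x ∈ seen) → wanted ∉ seen →
      (∀ c ∈ seen, c ∈ queue ∨ ∀ n ∈ pvRhs rules c, n ∈ seen) →
      (∀ x ∈ init, x ∈ seen) →
      (2 * ((pvUniv rules init).length - seen.length) + queue.length < f) →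
      pvReach rules init wanted →
      pvB_loop wanted rules f seen queue = true := by
  intro f
  induction f with
  | zero => intro seen queue _ _ _ _ _ _ hmeas _; omega
  | succ f ih =>
    intro seen queue hnd hsub hq hw hinv hinit hmeas hreach
    cases queue with
    | nil =>
      exfalso
      have hcl : pvClosed rules seen := by
        intro c hc n hn
        rcases hinv c hc with hc' | hc'
        · simp at hc'
        · exact hc' n hn
      exact hw (pvReach_mem hcl hinit _ hreach)
    | cons c rest =>
      rw [pvB_loop]
      cases hexp : pvB_expand wanted ((PySem.Dict.mk rules).getD c []) seen rest with
      | none => rfl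
      | some p =>
        obtain ⟨seen', queue'⟩ := p
        obtain ⟨h1, h2, h3, h4, h5, h8, h6, h7⟩ := pvB_expand_some wanted _ _ _ _ _ hexp
        have hwns : wanted ∉ pvRhs rules c := by
          intro hwn
          have hnone := (pvB_expand_none wanted ((PySem.Dict.mk rules).getD c []) seen rest).2 hwn
          rw [hnone] at hexp
          simp at hexp
        refine ih seen' queue' (h7 hnd) ?_ ?_ ?_ ?_ ?_ ?_ hreach
        · intro x hx
          rcases h2 x hx with hx | hx
          · exact hsub x hx
          · exact pv_rhs_subset_univ hx
        · intro x hx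
          rcases h4 x hx with hx | hx
          · exact h1 x (hq x (List.mem_cons_of_mem _ hx))
          · exact h3 x hx
        · intro hx
          rcases h2 wanted hx with hx | hx
          · exact hw hx
          · exact hwns hx
        · intro a ha
          rcases h8 a ha with ha' | ha'
          · rcases hinv a ha' with hb | hb
            · rcases List.mem_cons.1 hb with rfl | hb
              · exact Or.inr (fun n hn => h3 n hn)
              · exact Or.inl (h5 a hb)
            · exact Or.inr (fun n hn => h1 n (hb n hn))
          · exact Or.inl ha'
        · intro x hx
          exact h1 x (hinit x hx)
        · have hm1 : seen.length ≤ seen'.length := pv_nodup_len hnd h1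
          have hm2 : seen'.length ≤ (pvUniv rules init).length := by
            refine pv_nodup_len (h7 hnd) ?_
            intro x hx
            rcases h2 x hx with hx | hx
            · exact hsub x hx
            · exact pv_rhs_subset_univ hx
          have hql : (c :: rest).length = rest.length + 1 := by simp
          omega

lemma pvB_iff (wanted : String) (rules : List (String × List String)) (already_had : List String) :
    conversion_possible_alt wanted rules already_had = true ↔ pvReach rules already_had wanted := by
  rw [conversion_possible_alt]
  by_cases hw : (PySem.Set.ofList already_had).contains wanted = true
  · rw [if_pos hw]
    simp only [true_iff]
    exact pvReach.base ((PySem.Set.mem_ofList _ _).1 ((PySem.Set.contains_iff _ _).1 hw))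
  · rw [if_neg hw]
    have hwmem : wanted ∉ PySem.Set.ofList already_had :=
      fun hm => hw ((PySem.Set.contains_iff _ _).2 hm)
    constructor
    · intro h
      refine pvB_loop_sound wanted rules already_had _ _ _ ?_ (fun x hx => hx) h
      intro x hx
      exact pvReach.base ((PySem.Set.mem_ofList _ _).1 hx)
    · intro h
      have hsub : ∀ x ∈ PySem.Set.ofList already_had, x ∈ pvUniv rules already_had := by
        intro x hx
        simp only [pvUniv, PySem.Set.mem_ofList, List.mem_append]
        exact Or.inl ((PySem.Set.mem_ofList _ _).1 hx)
      have hlen1 : (PySem.Set.ofList already_had).length ≤ (pvUniv rules already_had).length :=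
        pv_nodup_len (PySem.Set.nodup_ofList _) hsub
      have hlen2 : (PySem.Set.ofList already_had).length ≤ already_had.length :=
        PySem.Set.length_ofList_le _
      refine pvB_loop_complete wanted rules already_had _ _ _ (PySem.Set.nodup_ofList _)
        hsub (fun x hx => hx) hwmem (fun c hc => Or.inl hc)
        (fun x hx => (PySem.Set.mem_ofList _ _).2 hx) (by omega) h

-- ===== VERDICT (by name: the statement is the Claim_ definition above) =====
theorem conversion_possible_spec : Claim_equal_conversion_possible := by
  intro wanted rules already_had _
  unfold Spec_conversion_possible
  have h := (pvA_iff wanted rules already_had).trans (pvB_iff wanted rules already_had).symm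
  exact Bool.eq_iff_iff.mpr h
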